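-- pv_equiv track=rewrite | github.com/curtis-sun/LLM4Rewrite | rag/gen_sql_templates.py | compact_mask
-- ===== SOURCE A (Python) =====
-- import typing as t
--
-- def compact_mask(l: t.List, mask: str) -> t.Tuple[int]:
--     if mask not in l:
--         return (-1, -1)
--     left_i = l.index(mask)
--     right_i = left_i + 1
--     while right_i < len(l):
--         if l[right_i] != mask:
--             break
--         right_i += 1
--     return (left_i, right_i - 1)
-- ===== SOURCE B (Python) =====
-- def compact_mask(l, mask):
--     n = len(l)
--     i = 0
--     while i < n:
--         # measure the run of equal elements starting at i
--         j = i + 1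
--         while j < n and l[j] == l[i]:
--             j += 1
--         if l[i] == mask:
--             return (i, j - 1)
--         i = j
--     return (-1, -1)
-- ===== Notes on version B (the rewrite author's own statement) =====
-- stated objective: alternative
-- what changed: B replaces A's membership-test + list.index + forward walk with a single run-by-run scan that measures each maximal run of equal elements and returns the first run whose value is the mask, so the separate 'in' and '.index' passes disappear.
import Mathlib
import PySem

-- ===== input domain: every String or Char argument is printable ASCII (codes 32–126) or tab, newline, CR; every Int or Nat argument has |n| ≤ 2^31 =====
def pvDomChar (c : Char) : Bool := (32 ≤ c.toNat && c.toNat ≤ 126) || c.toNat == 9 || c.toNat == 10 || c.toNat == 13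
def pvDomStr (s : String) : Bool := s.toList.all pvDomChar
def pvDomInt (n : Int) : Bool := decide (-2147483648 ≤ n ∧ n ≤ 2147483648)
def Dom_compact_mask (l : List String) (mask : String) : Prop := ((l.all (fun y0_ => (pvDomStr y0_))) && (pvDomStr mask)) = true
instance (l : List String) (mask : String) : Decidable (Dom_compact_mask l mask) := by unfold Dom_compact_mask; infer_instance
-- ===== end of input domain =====

-- B is a run-by-run decomposition of the same scan (alternative structure, same result; return value only).

-- ===== PORT A =====
-- the `while right_i < len(l): if l[right_i] != mask: break; right_i += 1` loop
def aWhile (l : List String) (mask : String) (ri : Nat) : Nat :=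
  if h : ri < l.length then
    if l[ri] ≠ mask then ri else aWhile l mask (ri + 1)
  else ri
termination_by l.length - ri

def compact_mask (l : List String) (mask : String) : Int × Int :=
  if ¬ l.contains mask then (-1, -1)
  else
    match PySem.List.index? l mask with
    | none => (-1, -1)   -- unreachable: mask ∈ l
    | some li => ((li : Int), ((aWhile l mask (li + 1) : Int)) - 1)

-- ===== PORT B =====
-- go(rest, i): measure the first run (count n, then rest[n:]), return its range if its value is mask, else skip it
def altGo (mask : String) : List String → Int → Int × Int
  | [], _ => (-1, -1)
  | h :: t, i =>
    let n : Int := 1 + (t.takeWhile (fun x => x == h)).length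
    if h == mask then (i, i + n - 1)
    else altGo mask (t.dropWhile (fun x => x == h)) (i + n)
termination_by rest => rest.length
decreasing_by
  simpa [Nat.lt_succ_iff] using List.length_dropWhile_le (p := fun x => x == h) (l := t)

def compact_mask_alt (l : List String) (mask : String) : Int × Int := altGo mask l 0

-- ===== PRECONDITION & SPEC =====
def Spec_compact_mask (l : List String) (mask : String) (out : Int × Int) : Prop := out = compact_mask_alt l mask
instance (l : List String) (mask : String) (out : Int × Int) : Decidable (Spec_compact_mask l mask out) := by unfold Spec_compact_mask; infer_instance

-- ===== CLAIM (what is proved, stated in full; the proofs are below) =====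
def Claim_equal_compact_mask : Prop := ∀ (l : List String) (mask : String), Dom_compact_mask l mask → Spec_compact_mask l mask (compact_mask l mask)

-- ===== LEMMAS AND PROOFS =====

theorem altGo_nil (mask : String) (i : Int) : altGo mask [] i = (-1, -1) := by
  rw [altGo.eq_def]

theorem altGo_cons (mask h : String) (t : List String) (i : Int) :
    altGo mask (h :: t) i =
      (if h == mask then (i, i + (1 + ((t.takeWhile (fun x => x == h)).length : Int)) - 1)
       else altGo mask (t.dropWhile (fun x => x == h)) (i + (1 + ((t.takeWhile (fun x => x == h)).length : Int)))) := by
  rw [altGo.eq_def]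

theorem aWhile_eq (l : List String) (mask : String) (j : Nat) :
    aWhile l mask j = j + ((l.drop j).takeWhile (fun x => x == mask)).length := by
  by_cases h : j < l.length
  · have hd : l.drop j = l[j] :: l.drop (j + 1) := List.drop_eq_getElem_cons h
    by_cases he : l[j] = mask
    · rw [aWhile, dif_pos h, if_neg (by simp [he]), aWhile_eq l mask (j + 1), hd]
      simp [he]
      omega
    · rw [aWhile, dif_pos h, if_pos he, hd]
      simp [he]
  · rw [aWhile]
    simp [h, List.drop_eq_nil_of_le (by omega : l.length ≤ j)]
termination_by l.length - j
decreasing_by omega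

theorem altGo_not_mem (mask : String) (l : List String) (i : Int) (hm : mask ∉ l) :
    altGo mask l i = (-1, -1) := by
  match l with
  | [] => exact altGo_nil mask i
  | h :: t =>
    rw [altGo_cons]
    have hne : ¬ (h == mask) = true := by
      simp only [beq_iff_eq]; intro he; exact hm (he ▸ List.mem_cons_self)
    simp only [hne]
    
    have : mask ∉ t.dropWhile (fun x => x == h) := fun hc =>
      hm (List.mem_cons_of_mem _ ((t.dropWhile_sublist _).mem hc))
    exact altGo_not_mem mask _ _ this
termination_by l.length
decreasing_by
  simpa [Nat.lt_succ_iff] using List.length_dropWhile_le (p := fun x => x == h) (l := t)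

theorem takeWhile_append_stop (p : String → Bool) (t : List String) (mask : String)
    (suf : List String) (hmp : p mask = false) :
    (t ++ mask :: suf).takeWhile p = t.takeWhile p := by
  induction t with
  | nil => simp [List.takeWhile, hmp]
  | cons a t ih =>
    by_cases ha : p a = true
    · simp [ha, ih]
    · simp [ha]

theorem dropWhile_append_stop (p : String → Bool) (t : List String) (mask : String)
    (suf : List String) (hmp : p mask = false) :
    (t ++ mask :: suf).dropWhile p = t.dropWhile p ++ mask :: suf := by
  induction t with
  | nil => simp [List.dropWhile, hmp]
  | cons a t ih =>
    by_cases ha : p a = true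
    · simp [ha, ih]
    · simp [ha]

theorem altGo_split (mask : String) (pre suf : List String) (i : Int) (hpre : mask ∉ pre) :
    altGo mask (pre ++ mask :: suf) i
      = (i + pre.length, i + pre.length + ((suf.takeWhile (fun x => x == mask)).length : Int)) := by
  match pre with
  | [] =>
    rw [List.nil_append, altGo_cons]
    simp
    omega
  | h :: t =>
    have hne : h ≠ mask := fun he => hpre (he ▸ List.mem_cons_self)
    rw [List.cons_append, altGo_cons]
    have hmaskf : ((fun x => x == h) mask) = false := by simpa using fun he => hne he.symm
    have htake := takeWhile_append_stop (fun x => x == h) t mask suf hmaskf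
    have hdrop := dropWhile_append_stop (fun x => x == h) t mask suf hmaskf
    have hne' : ¬ (h == mask) = true := by simpa using hne
    simp only [hne', htake, hdrop]
    have hmem : mask ∉ t.dropWhile (fun x => x == h) := fun hc =>
      hpre (List.mem_cons_of_mem _ ((t.dropWhile_sublist _).mem hc))
    have := altGo_split mask (t.dropWhile (fun x => x == h)) suf
      (i + (1 + ((t.takeWhile (fun x => x == h)).length : Int))) hmem
    rw [this]
    have hlen : (t.takeWhile (fun x => x == h)).length + (t.dropWhile (fun x => x == h)).length
        = t.length := by
      rw [← List.length_append, List.takeWhile_append_dropWhile]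
    rw [if_neg (by simp)]
    simp only [Prod.mk.injEq, List.length_cons]
    push_cast
    constructor <;> omega
termination_by pre.length
decreasing_by
  simpa [Nat.lt_succ_iff] using List.length_dropWhile_le (p := fun x => x == h) (l := t)

-- ===== VERDICT (by name: the statement is the Claim_ definition above) =====
theorem compact_mask_spec : Claim_equal_compact_mask := by
  intro l mask _
  unfold Spec_compact_mask compact_mask compact_mask_alt
  by_cases hm : mask ∈ l
  · have hs : ((PySem.List.index? l mask).isSome) = true := (PySem.List.index?_isSome_iff l mask).2 hm
    obtain ⟨k, hk⟩ := Option.isSome_iff_exists.1 hs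
    obtain ⟨pre, suf, hsplit, hlen, hnot⟩ := (PySem.List.index?_eq_some_iff l mask k).1 hk
    subst hsplit
    rw [if_neg (by simp [hm]), hk]
    rw [altGo_split mask pre suf 0 hnot]
    show ((k : Int), ((aWhile (pre ++ mask :: suf) mask (k + 1) : Nat) : Int) - 1) = _
    rw [aWhile_eq]
    have hdrop : (pre ++ mask :: suf).drop (k + 1) = suf := by
      have h2 : pre ++ mask :: suf = (pre ++ [mask]) ++ suf := by simp
      rw [h2, ← hlen]
      simp
    rw [hdrop]
    simp
    omega
  · rw [if_pos (by simpa using hm), altGo_not_mem mask l 0 hm]
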